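-- pv_equiv track=rewrite | github.com/TharaniDJ/Genealogy-Tree-Creator | backend/language-tree-service/app/services/language_info.py | _extract_iso_code
-- ===== SOURCE A (Python) =====
-- from typing import Optional, Dict, Tuple
--
-- def _extract_iso_code(infobox: Optional[Dict[str, str]]) -> Optional[str]:
-- 	if not infobox:
-- 		return None
-- 	# Prefer ISO 639-3 if present, else 639-1, else 639-2
-- 	preferences = ["ISO 639-3", "ISO 639-1", "ISO 639-2"]
-- 	for pref in preferences:
-- 		for k, v in infobox.items():
-- 			if k.lower().startswith(pref.lower()):
-- 				return v
-- 	# fallback: any key starting with ISO 639-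
-- 	for k, v in infobox.items():
-- 		if k.lower().startswith("iso 639-"):
-- 			return v
-- 	return None
-- ===== SOURCE B (Python) =====
-- from typing import Optional, Dict
--
-- def _extract_iso_code(infobox: Optional[Dict[str, str]]) -> Optional[str]:
--     if not infobox:
--         return None
--     # one pass: first value per preference bucket + first generic fallback
--     s3 = s1 = s2 = fb = None
--     for k, v in infobox.items():
--         kl = k.lower()
--         if not kl.startswith("iso 639-"):
--             continue
--         if fb is None:
--             fb = v
--         if s3 is None and kl.startswith("iso 639-3"):
--             s3 = v
--         if s1 is None and kl.startswith("iso 639-1"):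
--             s1 = v
--         if s2 is None and kl.startswith("iso 639-2"):
--             s2 = v
--     for cand in (s3, s1, s2, fb):
--         if cand is not None:
--             return cand
--     return None
-- ===== Notes on version B (the rewrite author's own statement) =====
-- stated objective: faster
-- what changed: Replaces A's four separate scans of the dict (one per preference plus a fallback scan) with a single pass that records the first value for each preference bucket and a first generic fallback, then selects by priority.
import Mathlib
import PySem

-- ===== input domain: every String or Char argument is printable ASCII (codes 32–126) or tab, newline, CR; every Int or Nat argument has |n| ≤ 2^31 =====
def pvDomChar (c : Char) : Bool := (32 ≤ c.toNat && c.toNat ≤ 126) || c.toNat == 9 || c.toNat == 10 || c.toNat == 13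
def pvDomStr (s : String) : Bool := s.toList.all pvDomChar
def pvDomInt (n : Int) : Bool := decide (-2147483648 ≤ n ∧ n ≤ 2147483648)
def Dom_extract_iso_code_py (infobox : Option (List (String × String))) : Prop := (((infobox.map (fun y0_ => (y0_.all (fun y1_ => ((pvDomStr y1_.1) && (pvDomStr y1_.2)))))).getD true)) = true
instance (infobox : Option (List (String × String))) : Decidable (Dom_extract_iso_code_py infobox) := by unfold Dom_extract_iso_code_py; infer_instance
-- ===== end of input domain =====

-- B replaces A's four separate scans of the dict with one pass filling per-preference
-- slots plus a fallback slot, then a priority selection (objective: faster, constant factor).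

-- ===== PORT A =====
-- inner 'for k, v in infobox.items(): if k.lower().startswith(pref.lower()): return v'
def pvScanA (pref : String) (items : List (String × String)) : Option String :=
  match items with
  | [] => none
  | (k, v) :: rest =>
      if PySem.Str.startswith (PySem.Str.lower k) (PySem.Str.lower pref) then some v
      else pvScanA pref rest

-- 'for pref in preferences: …' followed by the fallback scan and final 'return None'
def pvPrefLoopA (prefs : List String) (items : List (String × String)) : Option String :=
  match prefs with
  | [] =>
      -- fallback: any key starting with "iso 639-"
      (items.find? (fun kv => PySem.Str.startswith (PySem.Str.lower kv.1) "iso 639-")).map Prod.snd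
  | p :: rest =>
      match pvScanA p items with
      | some v => some v
      | none => pvPrefLoopA rest items

def extract_iso_code_py (infobox : Option (List (String × String))) : Option String :=
  match infobox with
  | none => none
  | some items =>
      if items = [] then none
      else pvPrefLoopA ["ISO 639-3", "ISO 639-1", "ISO 639-2"] items

-- ===== PORT B =====
-- one loop iteration of Source B: fill the three preference slots and the fallback slot
def pvStepB (st : Option String × Option String × Option String × Option String)
    (kv : String × String) :
    Option String × Option String × Option String × Option String :=
  let (s3, s1, s2, fb) := st
  let kl := PySem.Str.lower kv.1
  if PySem.Str.startswith kl "iso 639-" = false then (s3, s1, s2, fb)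
  else
    let fb := if fb = none then some kv.2 else fb
    let s3 := if s3 = none ∧ PySem.Str.startswith kl "iso 639-3" then some kv.2 else s3
    let s1 := if s1 = none ∧ PySem.Str.startswith kl "iso 639-1" then some kv.2 else s1
    let s2 := if s2 = none ∧ PySem.Str.startswith kl "iso 639-2" then some kv.2 else s2
    (s3, s1, s2, fb)

def extract_iso_code_py_alt (infobox : Option (List (String × String))) : Option String :=
  match infobox with
  | none => none
  | some items =>
      if items = [] then none
      else
        let (s3, s1, s2, fb) := items.foldl pvStepB (none, none, none, none)
        -- 'for cand in (s3, s1, s2, fb): if cand is not None: return cand'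
        match s3 with
        | some v => some v
        | none =>
          match s1 with
          | some v => some v
          | none =>
            match s2 with
            | some v => some v
            | none => fb

-- ===== PRECONDITION & SPEC =====
def Spec_extract_iso_code_py (infobox : Option (List (String × String))) (out : Option String) : Prop := out = extract_iso_code_py_alt infobox
instance (infobox : Option (List (String × String))) (out : Option String) : Decidable (Spec_extract_iso_code_py infobox out) := by unfold Spec_extract_iso_code_py; infer_instance

-- ===== CLAIM (what is proved, stated in full; the proofs are below) =====
def Claim_equal_extract_iso_code_py : Prop := ∀ (infobox : Option (List (String × String))), Dom_extract_iso_code_py infobox → Spec_extract_iso_code_py infobox (extract_iso_code_py infobox)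

-- ===== LEMMAS AND PROOFS =====

-- "k.lower().startswith(p)" for an (already lowercase) prefix p; named so simp keeps it folded
def pvKeyMatch (p k : String) : Bool := PySem.Str.startswith (PySem.Str.lower k) p

def pvFind (p : String) (items : List (String × String)) : Option String :=
  (items.find? (fun kv => pvKeyMatch p kv.1)).map Prod.snd

theorem pvKey_sub (p q k : String) (hpq : q.toList <+: p.toList)
    (h : pvKeyMatch p k = true) : pvKeyMatch q k = true := by
  unfold pvKeyMatch at h ⊢
  simp only [PySem.Str.startswith_eq, PySem.Chars.startswith_iff] at h ⊢
  exact hpq.trans h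

theorem pvFind_cons (p k v : String) (rest : List (String × String)) :
    pvFind p ((k, v) :: rest) = if pvKeyMatch p k then some v else pvFind p rest := by
  cases h : pvKeyMatch p k <;> simp [pvFind, h]

theorem pvScanA_eq (pref : String) (items : List (String × String)) :
    pvScanA pref items = pvFind (PySem.Str.lower pref) items := by
  induction items with
  | nil => rfl
  | cons kv rest ih =>
      obtain ⟨k, v⟩ := kv
      rw [pvFind_cons]
      show (if pvKeyMatch (PySem.Str.lower pref) k = true then some v else pvScanA pref rest) = _
      cases h : pvKeyMatch (PySem.Str.lower pref) k <;> simp [ih]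

-- invariant of B's single pass: each slot ends as "old value, else first match of its bucket"
theorem pv_fold_inv (items : List (String × String)) :
    ∀ s3 s1 s2 fb,
    items.foldl pvStepB (s3, s1, s2, fb) =
      ((if s3 = none then pvFind "iso 639-3" items else s3),
       (if s1 = none then pvFind "iso 639-1" items else s1),
       (if s2 = none then pvFind "iso 639-2" items else s2),
       (if fb = none then pvFind "iso 639-" items else fb)) := by
  induction items with
  | nil => intro s3 s1 s2 fb; cases s3 <;> cases s1 <;> cases s2 <;> cases fb <;> rfl
  | cons kv rest ih =>
      intro s3 s1 s2 fb
      obtain ⟨k, v⟩ := kv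
      have hstep : pvStepB (s3, s1, s2, fb) (k, v) =
          if pvKeyMatch "iso 639-" k = false then (s3, s1, s2, fb)
          else
            ((if s3 = none ∧ pvKeyMatch "iso 639-3" k then some v else s3),
             (if s1 = none ∧ pvKeyMatch "iso 639-1" k then some v else s1),
             (if s2 = none ∧ pvKeyMatch "iso 639-2" k then some v else s2),
             (if fb = none then some v else fb)) := rfl
      rw [List.foldl_cons, hstep, pvFind_cons, pvFind_cons, pvFind_cons, pvFind_cons]
      cases hfb : pvKeyMatch "iso 639-" k
      · have h3 : pvKeyMatch "iso 639-3" k = false := by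
          by_contra h
          rw [pvKey_sub "iso 639-3" "iso 639-" k (by decide)
            (Bool.not_eq_false _ |>.mp h)] at hfb
          exact Bool.true_eq_false.mp hfb
        have h1 : pvKeyMatch "iso 639-1" k = false := by
          by_contra h
          rw [pvKey_sub "iso 639-1" "iso 639-" k (by decide)
            (Bool.not_eq_false _ |>.mp h)] at hfb
          exact Bool.true_eq_false.mp hfb
        have h2 : pvKeyMatch "iso 639-2" k = false := by
          by_contra h
          rw [pvKey_sub "iso 639-2" "iso 639-" k (by decide)
            (Bool.not_eq_false _ |>.mp h)] at hfb
          exact Bool.true_eq_false.mp hfb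
        simp [ih, h3, h1, h2]
      · simp only [Bool.true_eq_false, if_false, ih]
        cases s3 <;> cases s1 <;> cases s2 <;> cases fb <;>
          cases h3 : pvKeyMatch "iso 639-3" k <;>
          cases h1 : pvKeyMatch "iso 639-1" k <;>
          cases h2 : pvKeyMatch "iso 639-2" k <;>
          simp

theorem pv_fold_none (items : List (String × String)) :
    items.foldl pvStepB (none, none, none, none) =
      (pvFind "iso 639-3" items, pvFind "iso 639-1" items,
       pvFind "iso 639-2" items, pvFind "iso 639-" items) := by
  rw [pv_fold_inv]; simp

-- ===== VERDICT (by name: the statement is the Claim_ definition above) =====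
theorem extract_iso_code_py_spec : Claim_equal_extract_iso_code_py := by
  intro infobox _
  unfold Spec_extract_iso_code_py
  match infobox with
  | none => rfl
  | some items =>
      by_cases hnil : items = []
      · simp [extract_iso_code_py, extract_iso_code_py_alt, hnil]
      · have e3 : pvScanA "ISO 639-3" items = pvFind "iso 639-3" items := by
          rw [pvScanA_eq, show PySem.Str.lower "ISO 639-3" = "iso 639-3" from by decide]
        have e1 : pvScanA "ISO 639-1" items = pvFind "iso 639-1" items := by
          rw [pvScanA_eq, show PySem.Str.lower "ISO 639-1" = "iso 639-1" from by decide]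
        have e2 : pvScanA "ISO 639-2" items = pvFind "iso 639-2" items := by
          rw [pvScanA_eq, show PySem.Str.lower "ISO 639-2" = "iso 639-2" from by decide]
        have efb : pvPrefLoopA [] items = pvFind "iso 639-" items := rfl
        simp only [extract_iso_code_py, extract_iso_code_py_alt, hnil, if_false,
          pv_fold_none, pvPrefLoopA, e3, e1, e2]
        cases pvFind "iso 639-3" items <;> cases pvFind "iso 639-1" items <;>
          cases pvFind "iso 639-2" items <;> simp [pvFind, pvKeyMatch]
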